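-- pv_equiv track=rewrite | github.com/profitia/Dashboard-Apollo | src/core/angle_tracker.py | _find_secondary_angles
-- ===== SOURCE A (Python) =====
-- def _find_secondary_angles(
--     primary_id: str,
--     hypothesis: str,
--     subject: str,
--     body: str,
--     taxonomy: dict,
-- ) -> list[str]:
--     """Szuka secondary angles w treści (max 3, bez primary)."""
--     combined = f"{hypothesis} {subject} {body}".lower()
--     if not combined.strip():
--         return []
--
--     candidates = []
--     for angle_id, info in taxonomy.items():
--         if angle_id == primary_id or angle_id == "general":
--             continue
--         keywords = info.get("keywords", [])
--         hits = sum(1 for kw in keywords if kw.lower() in combined)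
--         if hits > 0:
--             candidates.append((angle_id, hits))
--
--     candidates.sort(key=lambda x: x[1], reverse=True)
--     return [c[0] for c in candidates[:3]]
-- ===== SOURCE B (Python) =====
-- def _find_secondary_angles(
--     primary_id: str,
--     hypothesis: str,
--     subject: str,
--     body: str,
--     taxonomy: dict,
-- ) -> list[str]:
--     """Bucket selection by hit count instead of a comparison sort."""
--     combined = f"{hypothesis} {subject} {body}".lower()
--     if not combined.strip():
--         return []
--
--     buckets = {}
--     max_hits = 0
--     for angle_id, info in taxonomy.items():
--         if angle_id == primary_id or angle_id == "general":
--             continue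
--         keywords = info.get("keywords", [])
--         hits = len([kw for kw in keywords if kw.lower() in combined])
--         if hits > 0:
--             buckets.setdefault(hits, []).append(angle_id)
--             if hits > max_hits:
--                 max_hits = hits
--
--     result = []
--     for count in range(max_hits, 0, -1):
--         result.extend(buckets.get(count, []))
--     return result[:3]
-- ===== Notes on version B (the rewrite author's own statement) =====
-- stated objective: alternative
-- what changed: Replaces the stable descending comparison sort of (angle_id, hits) candidate pairs by counting buckets keyed by hit count built in one pass, then emits buckets from the maximum hit count down and slices the first three.
import Mathlib
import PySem

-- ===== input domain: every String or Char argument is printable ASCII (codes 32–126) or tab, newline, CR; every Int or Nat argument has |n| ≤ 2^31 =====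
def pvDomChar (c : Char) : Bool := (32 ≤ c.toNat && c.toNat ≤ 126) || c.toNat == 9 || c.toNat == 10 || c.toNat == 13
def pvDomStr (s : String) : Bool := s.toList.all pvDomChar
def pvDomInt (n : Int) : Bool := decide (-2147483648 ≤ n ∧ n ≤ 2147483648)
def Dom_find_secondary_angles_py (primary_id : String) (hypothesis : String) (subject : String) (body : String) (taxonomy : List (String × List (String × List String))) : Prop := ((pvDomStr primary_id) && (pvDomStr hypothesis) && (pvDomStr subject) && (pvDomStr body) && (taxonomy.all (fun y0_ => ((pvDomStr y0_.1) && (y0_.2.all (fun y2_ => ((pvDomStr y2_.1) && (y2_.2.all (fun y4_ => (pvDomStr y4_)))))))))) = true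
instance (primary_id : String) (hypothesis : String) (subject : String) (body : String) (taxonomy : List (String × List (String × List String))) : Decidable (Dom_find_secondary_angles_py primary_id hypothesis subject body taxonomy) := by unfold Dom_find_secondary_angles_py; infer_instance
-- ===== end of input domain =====

-- B replaces A's stable descending sort of (id, hits) pairs by per-hit-count buckets
-- emitted from the maximum hit count down (objective: alternative selection algorithm).

-- ===== PORT A =====
def find_secondary_angles_py (primary_id : String) (hypothesis : String) (subject : String) (body : String) (taxonomy : List (String × List (String × List String))) : List String :=
  let combined := PySem.Str.lower (PySem.Str.join " " [hypothesis, subject, body])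
  if PySem.Str.strip combined = "" then []
  else
    let candidates : List (String × Int) := taxonomy.foldl (fun acc t =>
      if t.1 = primary_id ∨ t.1 = "general" then acc
      else
        let keywords := (PySem.Dict.mk t.2).getD "keywords" []
        let hits : Int := keywords.foldl
          (fun n kw => if PySem.Str.isIn (PySem.Str.lower kw) combined then n + 1 else n) 0
        if hits > 0 then acc ++ [(t.1, hits)] else acc) []
    let sortedC := PySem.List.sorted candidates (fun c => c.2) true
    (PySem.List.slice sortedC none (some 3)).map (fun c => c.1)

-- ===== PORT B =====
def find_secondary_angles_py_alt (primary_id : String) (hypothesis : String) (subject : String) (body : String) (taxonomy : List (String × List (String × List String))) : List String :=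
  let combined := PySem.Str.lower (PySem.Str.join " " [hypothesis, subject, body])
  if PySem.Str.strip combined = "" then []
  else
    let bm := taxonomy.foldl (fun (s : PySem.Dict Int (List String) × Int) t =>
      if t.1 = primary_id ∨ t.1 = "general" then s
      else
        let keywords := (PySem.Dict.mk t.2).getD "keywords" []
        let hits : Int := ((keywords.filter
          (fun kw => PySem.Str.isIn (PySem.Str.lower kw) combined)).length : Int)
        if hits > 0 then (s.1.modify hits [] (· ++ [t.1]), if hits > s.2 then hits else s.2)
        else s) (PySem.Dict.empty, 0)
    let result := (PySem.List.pyRange bm.2 0 (-1)).foldl (fun acc v => acc ++ bm.1.getD v []) []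
    PySem.List.slice result none (some 3)

-- ===== PRECONDITION & SPEC =====
def Spec_find_secondary_angles_py (primary_id : String) (hypothesis : String) (subject : String) (body : String) (taxonomy : List (String × List (String × List String))) (out : List String) : Prop := out = find_secondary_angles_py_alt primary_id hypothesis subject body taxonomy
instance (primary_id : String) (hypothesis : String) (subject : String) (body : String) (taxonomy : List (String × List (String × List String))) (out : List String) : Decidable (Spec_find_secondary_angles_py primary_id hypothesis subject body taxonomy out) := by unfold Spec_find_secondary_angles_py; infer_instance

-- ===== CLAIM (what is proved, stated in full; the proofs are below) =====
def Claim_equal_find_secondary_angles_py : Prop := ∀ (primary_id : String) (hypothesis : String) (subject : String) (body : String) (taxonomy : List (String × List (String × List String))), Dom_find_secondary_angles_py primary_id hypothesis subject body taxonomy → Spec_find_secondary_angles_py primary_id hypothesis subject body taxonomy (find_secondary_angles_py primary_id hypothesis subject body taxonomy)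

-- ===== LEMMAS AND PROOFS =====

/-- hit count of one taxonomy entry against the combined text -/
def pvHits (combined : String) (t : String × List (String × List String)) : Int :=
  (((PySem.Dict.mk t.2).getD "keywords" []).filter
    (fun kw => PySem.Str.isIn (PySem.Str.lower kw) combined)).length

/-- the 0-or-1 candidate pairs one taxonomy entry contributes -/
def pvG (primary_id combined : String) (t : String × List (String × List String)) : List (String × Int) :=
  if t.1 = primary_id ∨ t.1 = "general" then []
  else if pvHits combined t > 0 then [(t.1, pvHits combined t)] else []

lemma pvG_pos (primary_id combined : String) (t : String × List (String × List String))
    (p : String × Int) (hp : p ∈ pvG primary_id combined t) : 0 < p.2 := by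
  unfold pvG at hp
  split_ifs at hp with h1 h2
  · simp at hp
  · simp at hp; subst hp; exact h2
  · simp at hp

lemma insertBy_append_of_not_before {α : Type} (bef : α → α → Bool) (x : α) (l t : List α)
    (h : ∀ y ∈ l, bef x y = false) :
    PySem.List.insertBy bef x (l ++ t) = l ++ PySem.List.insertBy bef x t := by
  induction l with
  | nil => simp
  | cons y l ih =>
      simp only [List.cons_append, PySem.List.insertBy, h y (List.mem_cons_self ..)]
      simp [ih fun z hz => h z (List.mem_cons_of_mem _ hz)]

lemma insertBy_of_forall_before {α : Type} (bef : α → α → Bool) (x : α) (l : List α)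
    (h : ∀ y ∈ l, bef x y = true) :
    PySem.List.insertBy bef x l = x :: l := by
  cases l with
  | nil => rfl
  | cons y l => simp [PySem.List.insertBy, h y (List.mem_cons_self ..)]

/-- inserting c into descending buckets appends it to the bucket of its own hit count -/
lemma insert_blocks (c : String × Int) : ∀ (vs : List Int), vs.Pairwise (· > ·) →
    ∀ (G : Int → List (String × Int)), (∀ v ∈ vs, ∀ p ∈ G v, p.2 = v) → c.2 ∈ vs →
    PySem.List.insertBy (fun a b => decide (b.2 < a.2)) c (vs.flatMap G)
      = vs.flatMap (fun v => G v ++ if v = c.2 then [c] else []) := by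
  intro vs
  induction vs with
  | nil => intro _ _ _ hc; simp at hc
  | cons v vs ih =>
      intro hpw G hG hc
      rw [List.pairwise_cons] at hpw
      have hmemv : v ∈ v :: vs := List.mem_cons_self ..
      by_cases hv : v = c.2
      · have hnb : ∀ y ∈ G v, (fun a b => decide ((b : String × Int).2 < a.2)) c y = false := by
          intro y hy
          have := hG v hmemv y hy
          simp [this, hv]
        have hb : ∀ y ∈ vs.flatMap G, (fun a b => decide ((b : String × Int).2 < a.2)) c y = true := by
          intro y hy
          obtain ⟨v', hv', hyv'⟩ := List.mem_flatMap.1 hy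
          have h1 := hG v' (List.mem_cons_of_mem _ hv') y hyv'
          have h2 := hpw.1 v' hv'
          simp only [decide_eq_true_eq, h1]; omega
        rw [List.flatMap_cons, insertBy_append_of_not_before _ _ _ _ hnb,
          insertBy_of_forall_before _ _ _ hb, List.flatMap_cons]
        have hcongr : vs.flatMap (fun v' => G v' ++ if v' = c.2 then [c] else [])
            = vs.flatMap G := by
          apply List.flatMap_congr
          intro v' hv'
          have h2 := hpw.1 v' hv'
          have : ¬ v' = c.2 := by omega
          simp [this]
        simp [hcongr, hv]
      · have hc2 : c.2 ∈ vs := by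
          rcases List.mem_cons.1 hc with h | h
          · exact absurd h.symm hv
          · exact h
        have hlt : c.2 < v := hpw.1 _ hc2
        have hnb : ∀ y ∈ G v, (fun a b => decide ((b : String × Int).2 < a.2)) c y = false := by
          intro y hy
          have := hG v hmemv y hy
          simp only [decide_eq_false_iff_not, this]; omega
        rw [List.flatMap_cons, insertBy_append_of_not_before _ _ _ _ hnb,
          ih hpw.2 G (fun v' hv' => hG v' (List.mem_cons_of_mem _ hv')) hc2, List.flatMap_cons]
        simp [hv]

lemma pyRange_neg_one_pairwise_gt (m : Int) : (PySem.List.pyRange m 0 (-1)).Pairwise (· > ·) := by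
  rw [PySem.List.pyRange_neg_one]
  exact (List.pairwise_lt_range).map _ (fun a b h => by omega)

lemma mem_pyRange_neg_one_zero (m x : Int) (h1 : 0 < x) (h2 : x ≤ m) :
    x ∈ PySem.List.pyRange m 0 (-1) := by
  rw [PySem.List.pyRange_neg_one]
  refine List.mem_map.2 ⟨(m - x).toNat, List.mem_range.2 (by omega), by omega⟩

/-- Python's stable descending sort by hit count IS the bucket concatenation. -/
lemma sorted_rev_blocks (cs : List (String × Int)) (m : Int)
    (h : ∀ p ∈ cs, 0 < p.2 ∧ p.2 ≤ m) :
    PySem.List.sorted cs (fun c => c.2) true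
      = (PySem.List.pyRange m 0 (-1)).flatMap (fun v => cs.filter (fun p => p.2 == v)) := by
  induction cs using List.reverseRecOn with
  | nil =>
      rw [show (PySem.List.pyRange m 0 (-1)).flatMap (fun v => List.filter (fun p => p.2 == v) ([] : List (String × Int))) = [] from by simp]
      exact (PySem.List.sorted_eq_nil_iff _ _ _).2 rfl
  | append_singleton ys c ih =>
      have hys : ∀ p ∈ ys, 0 < p.2 ∧ p.2 ≤ m := fun p hp => h p (List.mem_append_left _ hp)
      have hc := h c (List.mem_append_right _ (List.mem_cons_self ..))
      rw [PySem.List.sorted_rev_eq_foldl_insertBy, List.foldl_append, List.foldl_cons,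
        List.foldl_nil, ← PySem.List.sorted_rev_eq_foldl_insertBy, ih hys]
      rw [insert_blocks c (PySem.List.pyRange m 0 (-1)) (pyRange_neg_one_pairwise_gt m)
        (fun v => ys.filter (fun p => p.2 == v))
        (fun v _ p hp => by simpa using (List.mem_filter.1 hp).2)
        (mem_pyRange_neg_one_zero m c.2 hc.1 hc.2)]
      apply List.flatMap_congr
      intro v _
      rw [List.filter_append]
      congr 1
      by_cases hv : v = c.2
      · subst hv; simp
      · have hvc : (c.2 == v) = false := by
          rw [beq_eq_false_iff_ne]
          exact fun h => hv h.symm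
        simp [hvc, hv]

/-- A's candidate loop produces exactly the flatMap of pvG. -/
lemma candA (primary_id combined : String) (taxonomy : List (String × List (String × List String))) :
    taxonomy.foldl (fun acc t =>
      if t.1 = primary_id ∨ t.1 = "general" then acc
      else
        let keywords := (PySem.Dict.mk t.2).getD "keywords" []
        let hits : Int := keywords.foldl
          (fun n kw => if PySem.Str.isIn (PySem.Str.lower kw) combined then n + 1 else n) 0
        if hits > 0 then acc ++ [(t.1, hits)] else acc) []
      = taxonomy.flatMap (pvG primary_id combined) := by
  rw [PySem.List.foldl_congr_mem taxonomy _
    (fun acc t => acc ++ pvG primary_id combined t) []]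
  · exact PySem.List.foldl_append_eq_flatMap _ _ []
  · intro acc t _
    simp only [pvG, pvHits, PySem.List.foldl_if_add_one, List.countP_eq_length_filter, zero_add]
    split_ifs <;> simp

/-- B's loop is the pair-fold of (bucket-building, running max) over the same candidates. -/
lemma candB (primary_id combined : String) (taxonomy : List (String × List (String × List String)))
    (s : PySem.Dict Int (List String) × Int) :
    taxonomy.foldl (fun (s : PySem.Dict Int (List String) × Int) t =>
      if t.1 = primary_id ∨ t.1 = "general" then s
      else
        let keywords := (PySem.Dict.mk t.2).getD "keywords" []
        let hits : Int := ((keywords.filter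
          (fun kw => PySem.Str.isIn (PySem.Str.lower kw) combined)).length : Int)
        if hits > 0 then (s.1.modify hits [] (· ++ [t.1]), if hits > s.2 then hits else s.2)
        else s) s
      = (taxonomy.flatMap (pvG primary_id combined)).foldl
          (fun s p => (s.1.modify p.2 [] (· ++ [p.1]), if p.2 > s.2 then p.2 else s.2)) s := by
  induction taxonomy generalizing s with
  | nil => rfl
  | cons t l ih =>
      rw [List.foldl_cons, ih, List.flatMap_cons, List.foldl_append]
      congr 1
      simp only [pvG, pvHits]
      split_ifs with h1 h2 h3
      · rfl
      · simp only [List.foldl_cons, List.foldl_nil]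
        rw [if_pos h3]
      · simp only [List.foldl_cons, List.foldl_nil]
        rw [if_neg h3]
      · rfl

-- ===== VERDICT (by name: the statement is the Claim_ definition above) =====
theorem find_secondary_angles_py_spec : Claim_equal_find_secondary_angles_py := by
  intro primary_id hypothesis subject body taxonomy _
  unfold Spec_find_secondary_angles_py find_secondary_angles_py find_secondary_angles_py_alt
  set combined := PySem.Str.lower (PySem.Str.join " " [hypothesis, subject, body]) with hcomb
  by_cases hstrip : PySem.Str.strip combined = ""
  · simp [hstrip]
  · simp only [hstrip, if_false]
    set cands := taxonomy.flatMap (pvG primary_id combined) with hcands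
    rw [candA primary_id combined taxonomy, candB primary_id combined taxonomy, ← hcands]
    have hsplit : List.foldl (fun (s : PySem.Dict Int (List String) × Int) (p : String × Int) =>
          (s.1.modify p.2 [] fun x => x ++ [p.1], if p.2 > s.2 then p.2 else s.2))
          (PySem.Dict.empty, 0) cands
        = (cands.foldl (fun (d : PySem.Dict Int (List String)) (p : String × Int) =>
              d.modify p.2 [] fun x => x ++ [p.1]) PySem.Dict.empty,
           cands.foldl (fun (m : Int) (p : String × Int) => if p.2 > m then p.2 else m) 0) :=
      PySem.List.foldl_prod_mk
        (fun (d : PySem.Dict Int (List String)) (p : String × Int) => d.modify p.2 [] fun x => x ++ [p.1])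
        (fun (m : Int) (p : String × Int) => if p.2 > m then p.2 else m) cands PySem.Dict.empty 0
    rw [hsplit]
    rw [PySem.List.foldl_congr_mem cands
      (fun (m : Int) (p : String × Int) => if p.2 > m then p.2 else m)
      (fun (m : Int) (p : String × Int) => max m p.2) 0 (fun m p _ => by dsimp only; omega)]
    set M := cands.foldl (fun (m : Int) (p : String × Int) => max m p.2) 0 with hM
    have hmax := PySem.List.le_foldl_max_int cands (fun p => p.2) 0
    have hbound : ∀ p ∈ cands, 0 < p.2 ∧ p.2 ≤ M := by
      intro p hp
      obtain ⟨t, _, hpt⟩ := List.mem_flatMap.1 hp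
      refine ⟨pvG_pos _ _ _ _ hpt, ?_⟩
      have := hmax.2 p hp
      simpa [hM] using this
    have hbucket : ∀ v : Int,
        (cands.foldl (fun (d : PySem.Dict Int (List String)) (p : String × Int) =>
            d.modify p.2 [] fun x => x ++ [p.1]) PySem.Dict.empty).getD v []
          = (cands.filter (fun p => p.2 == v)).map (fun p => p.1) := by
      intro v
      have hmap : cands.foldl (fun (d : PySem.Dict Int (List String)) (p : String × Int) =>
            d.modify p.2 [] fun x => x ++ [p.1]) PySem.Dict.empty
          = (cands.map Prod.swap).foldl (fun (d : PySem.Dict Int (List String)) (q : Int × String) =>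
            d.modify q.1 [] fun x => x ++ [q.2]) PySem.Dict.empty := by
        rw [List.foldl_map]; rfl
      rw [hmap, PySem.Dict.getD_foldl_modify_append]
      simp [List.filter_map, List.map_map, Function.comp_def, Prod.swap]
    rw [PySem.List.foldl_append_eq_flatMap (fun v =>
        (cands.foldl (fun (d : PySem.Dict Int (List String)) (p : String × Int) =>
          d.modify p.2 [] fun x => x ++ [p.1]) PySem.Dict.empty).getD v []) _ []]
    rw [List.flatMap_congr (fun v _ => hbucket v)]
    rw [PySem.List.slice_to _ (by norm_num), PySem.List.slice_to _ (by norm_num),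
      sorted_rev_blocks cands M hbound, List.map_take, List.map_flatMap]
    simp
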